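-- pv_equiv track=rewrite | github.com/Irina103/My_first_library | module2/code.py | get_previous_word_indices
-- ===== SOURCE A (Python) =====
-- def get_previous_word_indices(input_line):
--     # Разделяем строку на отдельные слова
--     text_split = input_line.split()
--
--     # Подготавливаем словарь для хранения слова и его первого индекса
--     dict_01 = dict()
--
--     # Создаём список для хранения индексов (по умолчанию все элементы -1)
--     lst = [-1 for _ in range(len(text_split))]
--
--     # Итерируем по индексам списка слов
--     for idx in range(len(text_split)):
--         # Если слово уже встречалось
--         if text_split[idx] in dict_01:
--             # Заменяем в списке индексов соответствующий элемент на предыдущий индекс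
--             lst[idx] = dict_01[text_split[idx]]
--
--         # Присваиваем ключу слова текущий индекс
--         dict_01[text_split[idx]] = idx
--
--     return lst
-- ===== SOURCE B (Python) =====
-- def _prev_index(words, i):
--     j = i - 1
--     while j >= 0 and words[j] != words[i]:
--         j -= 1
--     return j
--
--
-- def get_previous_word_indices(input_line):
--     words = input_line.split()
--     return [_prev_index(words, i) for i in range(len(words))]
-- ===== Notes on version B (the rewrite author's own statement) =====
-- stated objective: alternative
-- what changed: Replaces the interleaved dict-of-last-occurrence scan with a dictionary-free per-index backward scan: for each position a while loop walks left until it hits an equal word (or -1).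
import Mathlib
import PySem

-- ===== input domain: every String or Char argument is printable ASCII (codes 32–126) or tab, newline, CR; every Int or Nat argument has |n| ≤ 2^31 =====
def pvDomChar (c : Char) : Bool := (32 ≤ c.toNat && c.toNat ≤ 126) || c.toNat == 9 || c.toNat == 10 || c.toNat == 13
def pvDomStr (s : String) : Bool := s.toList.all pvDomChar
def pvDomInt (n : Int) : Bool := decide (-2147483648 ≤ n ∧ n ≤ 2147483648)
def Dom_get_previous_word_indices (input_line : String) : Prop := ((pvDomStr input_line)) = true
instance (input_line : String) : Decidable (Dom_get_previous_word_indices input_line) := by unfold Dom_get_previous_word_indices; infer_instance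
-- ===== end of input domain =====

-- B replaces A's interleaved last-occurrence dictionary with a dictionary-free
-- per-index backward scan (alternative decomposition; not claimed faster).

-- ===== PORT A =====
-- A: split, list of -1s, one pass keeping a dict word -> last index seen, writing lst[idx] on repeats
def get_previous_word_indices (input_line : String) : List Int :=
  let text_split := PySem.Str.split₀ input_line
  let lst0 : List Int := (List.range text_split.length).map (fun _ => (-1 : Int))
  let st := (List.range text_split.length).foldl
    (fun (st : PySem.Dict String Int × List Int) idx =>
      let w := text_split.getD idx ""
      let lst' := if st.1.contains w then st.2.set idx (st.1.getD w (-1)) else st.2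
      (st.1.insert w (idx : Int), lst'))
    (PySem.Dict.empty, lst0)
  st.2

-- ===== PORT B =====
-- B helper: the while loop 'j = i-1; while j >= 0 and words[j] != words[i]: j -= 1; return j'
def prevScan (words : List String) (w : String) : Nat → Int
  | 0 => -1
  | k + 1 => if words.getD k "" ≠ w then prevScan words w k else (k : Int)

def get_previous_word_indices_alt (input_line : String) : List Int :=
  let words := PySem.Str.split₀ input_line
  (List.range words.length).map (fun i => prevScan words (words.getD i "") i)

-- ===== PRECONDITION & SPEC =====
def Spec_get_previous_word_indices (input_line : String) (out : List Int) : Prop := out = get_previous_word_indices_alt input_line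
instance (input_line : String) (out : List Int) : Decidable (Spec_get_previous_word_indices input_line out) := by unfold Spec_get_previous_word_indices; infer_instance

-- ===== CLAIM (what is proved, stated in full; the proofs are below) =====
def Claim_equal_get_previous_word_indices : Prop := ∀ (input_line : String), Dom_get_previous_word_indices input_line → Spec_get_previous_word_indices input_line (get_previous_word_indices input_line)

-- ===== LEMMAS AND PROOFS =====

-- last occurrence of w among indices < i, as an Option (none ↔ A's dict has no entry)
def optPrev (words : List String) (w : String) : Nat → Option Int
  | 0 => none
  | k + 1 => if words.getD k "" ≠ w then optPrev words w k else some (k : Int)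

theorem prevScan_eq_optPrev (words : List String) (w : String) (i : Nat) :
    prevScan words w i = (optPrev words w i).getD (-1) := by
  induction i with
  | zero => rfl
  | succ k ih =>
    simp only [prevScan, optPrev]
    split_ifs <;> simp [ih]

-- one step of A's loop preserves the invariant
theorem step_dict (words : List String) (m : Nat)
    (d : PySem.Dict String Int) (hd : ∀ w, d.get? w = optPrev words w m) (w : String) :
    (d.insert (words.getD m "") (m : Int)).get? w = optPrev words w (m + 1) := by
  rw [PySem.Dict.get?_insert]
  simp only [optPrev, hd]
  split_ifs with h1 h2 h2 <;> simp_all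

theorem contains_eq (words : List String) (m : Nat)
    (d : PySem.Dict String Int) (hd : ∀ w, d.get? w = optPrev words w m) :
    d.contains (words.getD m "") = (optPrev words (words.getD m "") m).isSome := by
  rw [PySem.Dict.contains_eq_isSome_get?, hd]

theorem step_list (words : List String) (m : Nat) (hm : m < words.length)
    (d : PySem.Dict String Int) (hd : ∀ w, d.get? w = optPrev words w m) :
    (if d.contains (words.getD m "") then
        ((List.range words.length).map
          (fun k => if k < m then prevScan words (words.getD k "") k else (-1 : Int))).set m
          (d.getD (words.getD m "") (-1))
      else
        (List.range words.length).map
          (fun k => if k < m then prevScan words (words.getD k "") k else (-1 : Int)))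
    = (List.range words.length).map
        (fun k => if k < m + 1 then prevScan words (words.getD k "") k else (-1 : Int)) := by
  rw [contains_eq words m d hd]
  rcases hv : optPrev words (words.getD m "") m with _ | v
  · simp only [Option.isSome_none, Bool.false_eq_true, if_false]
    apply List.map_congr_left
    intro k hk
    by_cases hkm : k = m
    · subst hkm
      rw [if_neg (Nat.lt_irrefl k), if_pos (Nat.lt_succ_self k), prevScan_eq_optPrev, hv]
      rfl
    · have hiff : k < m ↔ k < m + 1 := by omega
      simp only [hiff]
  · simp only [Option.isSome_some, if_true]
    have hgetD : d.getD (words.getD m "") (-1) = v := by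
      rw [PySem.Dict.getD_eq_get?_getD, hd, hv]; rfl
    rw [hgetD]
    apply List.ext_getElem
    · simp
    · intro k h1 h2
      have hk : k < words.length := by simpa using h2
      rw [List.getElem_set]
      by_cases hkm : k = m
      · subst hkm
        rw [if_pos rfl]
        simp only [List.getElem_map, List.getElem_range]
        rw [if_pos (Nat.lt_succ_self k), prevScan_eq_optPrev, hv]
        rfl
      · rw [if_neg (fun h => hkm h.symm)]
        simp only [List.getElem_map, List.getElem_range]
        have hiff : k < m ↔ k < m + 1 := by omega
        simp only [hiff]

-- the loop invariant: after folding over range i, the dict answers optPrev and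
-- the list holds B's values below i and -1 from i upward
theorem loop_invariant (words : List String) (i : Nat) (hi : i ≤ words.length) :
    (∀ w, ((List.range i).foldl
      (fun (st : PySem.Dict String Int × List Int) idx =>
        let w := words.getD idx ""
        let lst' := if st.1.contains w then st.2.set idx (st.1.getD w (-1)) else st.2
        (st.1.insert w (idx : Int), lst'))
      (PySem.Dict.empty, (List.range words.length).map (fun _ => (-1 : Int)))).1.get? w
        = optPrev words w i)
    ∧ ((List.range i).foldl
      (fun (st : PySem.Dict String Int × List Int) idx =>
        let w := words.getD idx ""
        let lst' := if st.1.contains w then st.2.set idx (st.1.getD w (-1)) else st.2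
        (st.1.insert w (idx : Int), lst'))
      (PySem.Dict.empty, (List.range words.length).map (fun _ => (-1 : Int)))).2
        = (List.range words.length).map
            (fun k => if k < i then prevScan words (words.getD k "") k else (-1 : Int)) := by
  induction i with
  | zero =>
    constructor
    · intro w; simp [optPrev, PySem.Dict.get?_empty]
    · simp
  | succ m ih =>
    have hm : m ≤ words.length := Nat.le_of_succ_le hi
    obtain ⟨ihd, ihl⟩ := ih hm
    rw [List.range_succ, List.foldl_append, List.foldl_cons, List.foldl_nil]
    have hmlt : m < words.length := hi
    refine ⟨fun w => step_dict words m _ ihd w, ?_⟩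
    simp only []
    rw [ihl]
    exact step_list words m hmlt _ ihd

-- ===== VERDICT (by name: the statement is the Claim_ definition above) =====
theorem get_previous_word_indices_spec : Claim_equal_get_previous_word_indices := by
  intro input_line _
  unfold Spec_get_previous_word_indices get_previous_word_indices get_previous_word_indices_alt
  have h := (loop_invariant (PySem.Str.split₀ input_line) (PySem.Str.split₀ input_line).length le_rfl).2
  simp only [] at h ⊢
  rw [h]
  apply List.map_congr_left
  intro k hk
  have : k < (PySem.Str.split₀ input_line).length := by simpa using hk
  simp [this]
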